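-- pv_equiv track=rewrite | github.com/BeastBreath/PasswordCheckerAndGenerator | checkCharectorsinPassword.py | checkCharectorsinPassword
-- ===== SOURCE A (Python) =====
-- def checkCharectorsinPassword(password = ""):
--     lowerCase = 'qwertyuioplkjhgfdsazxcvbnm'
--     upperCase = 'QWERTYUIOPLKJHGFDSAZXCVBNM'
--     specialCharectors = '!@#$%^&*()~`\"\';:<,>.?/+=_-'
--     numbers = '1234567890'
--     groups = [lowerCase, upperCase, specialCharectors, numbers]
--
--     for s in groups:
--         found = False
--         for i in range(len(s)):
--             if s[i] in password:
--                 found = True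
--                 break
--
--         if not found:
--             return False
--     return True
-- ===== SOURCE B (Python) =====
-- def checkCharectorsinPassword(password = ""):
--     lower = set('qwertyuioplkjhgfdsazxcvbnm')
--     upper = set('QWERTYUIOPLKJHGFDSAZXCVBNM')
--     special = set('!@#$%^&*()~`"\';:<,>.?/+=_-')
--     digits = set('1234567890')
--     has_l = has_u = has_s = has_d = False
--     for c in password:
--         if c in lower:
--             has_l = True
--         if c in upper:
--             has_u = True
--         if c in special:
--             has_s = True
--         if c in digits:
--             has_d = True
--         if has_l and has_u and has_s and has_d:
--             return True
--     return has_l and has_u and has_s and has_d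
-- ===== Notes on version B (the rewrite author's own statement) =====
-- stated objective: idiomatic
-- what changed: B makes a single pass over the password maintaining four coverage flags (with early exit once all groups are seen), instead of A's loop over the 88 group characters each scanning the whole password.
import Mathlib
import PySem

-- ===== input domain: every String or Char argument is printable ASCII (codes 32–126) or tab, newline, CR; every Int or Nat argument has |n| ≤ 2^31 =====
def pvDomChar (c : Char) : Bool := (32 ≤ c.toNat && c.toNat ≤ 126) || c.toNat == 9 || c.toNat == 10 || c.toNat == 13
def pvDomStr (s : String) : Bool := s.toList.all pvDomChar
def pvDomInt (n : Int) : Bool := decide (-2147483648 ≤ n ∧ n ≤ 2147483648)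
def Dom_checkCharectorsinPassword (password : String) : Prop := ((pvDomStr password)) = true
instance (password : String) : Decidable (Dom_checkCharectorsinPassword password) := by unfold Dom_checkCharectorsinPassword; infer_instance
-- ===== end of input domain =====

-- B: one pass over the password maintaining four coverage flags (early exit), instead of A's scan of the password for each of the 88 group characters.


-- ===== PORT A =====
-- the four group strings as character lists
def pvLower : List Char := "qwertyuioplkjhgfdsazxcvbnm".toList
def pvUpper : List Char := "QWERTYUIOPLKJHGFDSAZXCVBNM".toList
def pvSpecial : List Char := "!@#$%^&*()~`\"';:<,>.?/+=_-".toList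
def pvNumbers : List Char := "1234567890".toList

-- inner loop of A: scan the group string s, break as soon as some s[i] occurs in the password
def pvFoundLoop (s : List Char) (pw : List Char) : Bool :=
  match s with
  | [] => false
  | c :: rest => if pw.contains c then true else pvFoundLoop rest pw

-- outer loop of A: 'for s in groups: … if not found: return False' / 'return True'
def pvGroupsLoop (groups : List (List Char)) (pw : List Char) : Bool :=
  match groups with
  | [] => true
  | s :: rest => if pvFoundLoop s pw then pvGroupsLoop rest pw else false

def checkCharectorsinPassword (password : String) : Bool :=
  pvGroupsLoop [pvLower, pvUpper, pvSpecial, pvNumbers] password.toList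

-- ===== PORT B =====
-- single pass over the password with four coverage flags and early exit
def pvAltLoop (cs : List Char) (l u s d : Bool) : Bool :=
  match cs with
  | [] => l && u && s && d
  | c :: rest =>
      let l := if pvLower.contains c then true else l
      let u := if pvUpper.contains c then true else u
      let s := if pvSpecial.contains c then true else s
      let d := if pvNumbers.contains c then true else d
      if l && u && s && d then true else pvAltLoop rest l u s d

def checkCharectorsinPassword_alt (password : String) : Bool :=
  pvAltLoop password.toList false false false false

-- ===== PRECONDITION & SPEC =====
def Spec_checkCharectorsinPassword (password : String) (out : Bool) : Prop := out = checkCharectorsinPassword_alt password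
instance (password : String) (out : Bool) : Decidable (Spec_checkCharectorsinPassword password out) := by unfold Spec_checkCharectorsinPassword; infer_instance

-- ===== CLAIM (what is proved, stated in full; the proofs are below) =====
def Claim_equal_checkCharectorsinPassword : Prop := ∀ (password : String), Dom_checkCharectorsinPassword password → Spec_checkCharectorsinPassword password (checkCharectorsinPassword password)

-- ===== LEMMAS AND PROOFS =====

-- A's inner loop decides 'some character of s occurs in pw'
lemma pvFoundLoop_eq_any (s pw : List Char) : pvFoundLoop s pw = s.any pw.contains := by
  induction s with
  | nil => rfl
  | cons c rest ih =>
      unfold pvFoundLoop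
      rw [List.any_cons]
      cases h : pw.contains c <;> simp_all

-- scanning the group for a password character = scanning the password for a group character
lemma any_contains_comm (s pw : List Char) : s.any pw.contains = pw.any s.contains := by
  rw [Bool.eq_iff_iff]
  simp only [List.any_eq_true, List.contains_iff_mem]
  exact ⟨fun ⟨x, h1, h2⟩ => ⟨x, h2, h1⟩, fun ⟨x, h1, h2⟩ => ⟨x, h2, h1⟩⟩

-- Python's 'if b: x = True' as a boolean or
lemma pvIfOr (b f : Bool) : (if b = true then true else f) = (b || f) := by
  cases b <;> simp

-- invariant of B's loop: it computes flag-or-coverage for each group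
lemma pvAltLoop_eq (cs : List Char) : ∀ l u s d : Bool,
    pvAltLoop cs l u s d =
      ((l || cs.any pvLower.contains) && (u || cs.any pvUpper.contains) &&
       (s || cs.any pvSpecial.contains) && (d || cs.any pvNumbers.contains)) := by
  induction cs with
  | nil => intro l u s d; simp [pvAltLoop]
  | cons c rest ih =>
      intro l u s d
      simp only [pvAltLoop, List.any_cons, pvIfOr, ih]
      generalize pvLower.contains c = Lc
      generalize pvUpper.contains c = Uc
      generalize pvSpecial.contains c = Sc
      generalize pvNumbers.contains c = Nc
      generalize rest.any pvLower.contains = RL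
      generalize rest.any pvUpper.contains = RU
      generalize rest.any pvSpecial.contains = RS
      generalize rest.any pvNumbers.contains = RN
      revert l u s d Lc Uc Sc Nc RL RU RS RN
      decide

-- ===== VERDICT (by name: the statement is the Claim_ definition above) =====
theorem checkCharectorsinPassword_spec : Claim_equal_checkCharectorsinPassword := by
  intro password _
  unfold Spec_checkCharectorsinPassword checkCharectorsinPassword checkCharectorsinPassword_alt
  rw [pvAltLoop_eq]
  simp only [pvGroupsLoop, pvFoundLoop_eq_any, any_contains_comm]
  by_cases h1 : (password.toList).any pvLower.contains <;>
    by_cases h2 : (password.toList).any pvUpper.contains <;>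
    by_cases h3 : (password.toList).any pvSpecial.contains <;>
    by_cases h4 : (password.toList).any pvNumbers.contains <;>
    simp [h1, h2, h3, h4]
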